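-- pv_equiv track=rewrite | github.com/mahzad71/PSI_private_server_public_client_MMIC_docs | set_gen_icd10.py | fixed_length_encode
-- ===== SOURCE A (Python) =====
-- def fixed_length_encode(icd_code):
--     base_value = 0
--     for char in icd_code:
--         if char.isdigit():
--             value = int(char)
--         elif char.isalpha():
--             value = ord(char.upper()) - ord('A') + 1
--         else:
--             value = 0
--         base_value = (base_value * 36 + value) % (10**12)
--     return base_value
-- ===== SOURCE B (Python) =====
-- def fixed_length_encode(icd_code):
--     M = 10 ** 12
--     total = 0
--     power = 1
--     for char in reversed(icd_code):
--         if char.isdigit():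
--             value = int(char)
--         elif char.isalpha():
--             value = ord(char.upper()) - ord('A') + 1
--         else:
--             value = 0
--         total = (total + value * power) % M
--         power = (power * 36) % M
--     return total
-- ===== Notes on version B (the rewrite author's own statement) =====
-- stated objective: alternative
-- what changed: B replaces A's left-to-right Horner rolling hash with a right-to-left positional-polynomial accumulation that maintains an explicit running power of 36 modulo 10**12.
import Mathlib
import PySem

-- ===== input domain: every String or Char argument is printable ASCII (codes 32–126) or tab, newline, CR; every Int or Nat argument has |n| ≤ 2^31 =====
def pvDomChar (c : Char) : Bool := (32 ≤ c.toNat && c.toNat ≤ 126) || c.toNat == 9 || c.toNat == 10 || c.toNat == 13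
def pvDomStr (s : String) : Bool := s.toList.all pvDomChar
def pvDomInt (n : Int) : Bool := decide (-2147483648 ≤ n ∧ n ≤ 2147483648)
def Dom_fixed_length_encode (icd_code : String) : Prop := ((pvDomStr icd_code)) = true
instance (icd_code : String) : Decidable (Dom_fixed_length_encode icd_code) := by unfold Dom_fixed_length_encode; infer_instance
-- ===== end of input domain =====

-- B replaces A's left-to-right Horner rolling hash with a right-to-left positional-polynomial
-- accumulation keeping an explicit running power of 36 mod 10^12 (objective: alternative).

-- per-character value, identical in both Pythons:
-- digit → int(char), letter → ord(char.upper()) - ord('A') + 1, else 0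
def pvCharVal (c : Char) : Int :=
  if PySem.Chars.isdigit c then (PySem.Int.ofChars? [c]).getD 0
  else if PySem.Chars.isalpha c then ((PySem.Chars.upperChar c).toNat : Int) - 65 + 1
  else 0

-- ===== PORT A =====
def fixed_length_encode (icd_code : String) : Int :=
  icd_code.toList.foldl
    (fun base_value c => PySem.Int.mod (base_value * 36 + pvCharVal c) (10 ^ 12)) 0

-- ===== PORT B =====
def pvAltLoop : List Char → Int → Int → Int
  | [], total, _ => total
  | c :: rest, total, power =>
      pvAltLoop rest (PySem.Int.mod (total + pvCharVal c * power) (10 ^ 12))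
                     (PySem.Int.mod (power * 36) (10 ^ 12))

def fixed_length_encode_alt (icd_code : String) : Int :=
  pvAltLoop icd_code.toList.reverse 0 1

-- ===== PRECONDITION & SPEC =====
def Spec_fixed_length_encode (icd_code : String) (out : Int) : Prop := out = fixed_length_encode_alt icd_code
instance (icd_code : String) (out : Int) : Decidable (Spec_fixed_length_encode icd_code out) := by unfold Spec_fixed_length_encode; infer_instance

-- ===== CLAIM (what is proved, stated in full; the proofs are below) =====
def Claim_equal_fixed_length_encode : Prop := ∀ (icd_code : String), Dom_fixed_length_encode icd_code → Spec_fixed_length_encode icd_code (fixed_length_encode icd_code)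

-- ===== LEMMAS AND PROOFS =====

-- Horner fold without the modulus
def pvNomodA (a : Int) : List Char → Int
  | [] => a
  | c :: t => pvNomodA (a * 36 + pvCharVal c) t

-- Σ v(l i) * 36 ^ i  (lowest position first)
def pvPoly : List Char → Int
  | [] => 0
  | c :: t => pvCharVal c + 36 * pvPoly t

theorem pvmod_eq (x : Int) : PySem.Int.mod x (10 ^ 12) = x % (10 ^ 12) :=
  PySem.Int.mod_eq_emod_of_pos (by norm_num)

theorem pvA_loop_mod (l : List Char) : ∀ x : Int,
    List.foldl (fun a c => PySem.Int.mod (a * 36 + pvCharVal c) (10 ^ 12)) (x % 10 ^ 12) l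
      = pvNomodA x l % 10 ^ 12 := by
  induction l with
  | nil => intro x; simp [pvNomodA]
  | cons c t ih =>
      intro x
      have h : PySem.Int.mod (x % 10 ^ 12 * 36 + pvCharVal c) (10 ^ 12)
          = (x * 36 + pvCharVal c) % 10 ^ 12 := by
        rw [pvmod_eq]
        conv_rhs => rw [Int.add_emod, Int.mul_emod]
        rw [Int.add_emod, Int.mul_emod, Int.emod_emod_of_dvd _ dvd_rfl]
      simp only [List.foldl_cons, h, ih (x * 36 + pvCharVal c), pvNomodA]

theorem pvB_loop_mod (l : List Char) : ∀ t p : Int,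
    pvAltLoop l (t % 10 ^ 12) (p % 10 ^ 12) = (t + p * pvPoly l) % 10 ^ 12 := by
  induction l with
  | nil => intro t p; simp [pvAltLoop, pvPoly]
  | cons c r ih =>
      intro t p
      have h1 : PySem.Int.mod (t % 10 ^ 12 + pvCharVal c * (p % 10 ^ 12)) (10 ^ 12)
          = (t + pvCharVal c * p) % 10 ^ 12 := by
        rw [pvmod_eq]
        conv_rhs => rw [Int.add_emod, Int.mul_emod]
        rw [Int.add_emod, Int.mul_emod, Int.emod_emod_of_dvd _ dvd_rfl,
          Int.emod_emod_of_dvd _ dvd_rfl]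
      have h2 : PySem.Int.mod (p % 10 ^ 12 * 36) (10 ^ 12) = (p * 36) % 10 ^ 12 := by
        rw [pvmod_eq]
        conv_rhs => rw [Int.mul_emod]
        rw [Int.mul_emod, Int.emod_emod_of_dvd _ dvd_rfl]
      rw [pvAltLoop, h1, h2, ih (t + pvCharVal c * p) (p * 36), pvPoly]
      ring_nf

theorem pvPoly_append (xs : List Char) (c : Char) :
    pvPoly (xs ++ [c]) = pvPoly xs + 36 ^ xs.length * pvCharVal c := by
  induction xs with
  | nil => simp [pvPoly]
  | cons d t ih => simp [pvPoly, ih, pow_succ]; ring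

theorem pvNomodA_eq (l : List Char) : ∀ a : Int,
    pvNomodA a l = a * 36 ^ l.length + pvPoly l.reverse := by
  induction l with
  | nil => intro a; simp [pvNomodA, pvPoly]
  | cons c t ih =>
      intro a
      rw [pvNomodA, ih, List.reverse_cons, pvPoly_append]
      simp [pow_succ, List.length_reverse]
      ring

-- ===== VERDICT (by name: the statement is the Claim_ definition above) =====
theorem fixed_length_encode_spec : Claim_equal_fixed_length_encode := by
  intro s _
  show fixed_length_encode s = fixed_length_encode_alt s
  unfold fixed_length_encode fixed_length_encode_alt
  have h0 : ((0 : Int) % 10 ^ 12) = 0 := by norm_num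
  have hone : ((1 : Int) % 10 ^ 12) = 1 := by norm_num
  have h1 := pvA_loop_mod s.toList 0
  have h2 := pvB_loop_mod s.toList.reverse 0 1
  rw [h0] at h1
  rw [h0, hone, zero_add, one_mul] at h2
  rw [h1, h2, pvNomodA_eq, zero_mul, zero_add]
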